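-- pv_equiv track=rewrite | github.com/daniel-reich/ubiquitous-fiesta | dKeLAqAxpddbkvNhh_22.py | group_seats
-- ===== SOURCE A (Python) =====
-- def group_seats(lst, n):
--   w = '0' * n
--   ans = 0
--   for k in lst:
--     s = ''.join([str(v) for v in k])
--     if w in s:
--       for wi in range(len(s)):
--         ans = ans + (s[wi:wi+n] == w)
--   return ans
-- ===== SOURCE B (Python) =====
-- def group_seats(lst, n):
--     # Count starting positions of n consecutive '0' characters per row by a
--     # single pass over zero-runs (one traversal, no per-index slicing): a maximal run of r zeros has r - n + 1 starts.
--     total = 0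
--     for row in lst:
--         run = 0
--         for c in ''.join(str(v) for v in row):
--             if c == '0':
--                 run += 1
--             else:
--                 if run >= n:
--                     total += run - n + 1
--                 run = 0
--         if run >= n:
--             total += run - n + 1
--     return total
-- ===== Notes on version B (the rewrite author's own statement) =====
-- stated objective: alternative
-- what changed: A slides a window over every index of each row's joined digit string and compares the slice with '0'*n; B makes one pass tracking the current run of '0's and adds run-n+1 per maximal run of length >= n; Pre_ excludes n <= 0, outside the task's natural domain (the pattern '0'*n is empty there and A's count is an artefact of empty-slice comparisons).
-- outside the precondition, e.g. on group_seats([[1, 0]], 0): A returns 2, B returns 3; on group_seats([[1, 0, 0]], -1): A returns 2, B returns 6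
import Mathlib
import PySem

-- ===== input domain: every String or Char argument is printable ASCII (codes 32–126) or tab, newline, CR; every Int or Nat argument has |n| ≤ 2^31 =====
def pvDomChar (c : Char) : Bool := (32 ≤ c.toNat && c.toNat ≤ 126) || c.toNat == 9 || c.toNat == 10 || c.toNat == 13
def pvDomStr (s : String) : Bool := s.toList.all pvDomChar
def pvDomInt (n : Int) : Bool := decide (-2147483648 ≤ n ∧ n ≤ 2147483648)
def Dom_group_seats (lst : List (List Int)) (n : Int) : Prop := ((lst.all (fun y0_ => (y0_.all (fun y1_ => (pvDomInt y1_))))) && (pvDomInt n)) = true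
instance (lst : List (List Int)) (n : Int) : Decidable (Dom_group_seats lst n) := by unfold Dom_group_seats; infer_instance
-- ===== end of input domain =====

-- B replaces A's per-index substring comparison by a different algorithm: one pass
-- over maximal zero-runs, each run of length r ≥ n contributing r - n + 1 starting
-- positions.

-- ===== PORT A =====
-- ''.join(list of strings) is ported as flatten of the char lists (exact: empty separator).
def group_seats (lst : List (List Int)) (n : Int) : Int :=
  let w : List Char := PySem.List.pyRepeat ['0'] n         -- w = '0' * n
  lst.foldl (fun ans k =>
    let s : List Char := (k.map (fun v => PySem.Int.toChars v)).flatten  -- s = ''.join([str(v) for v in k])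
    if PySem.Chars.isIn w s then                            -- if w in s:
      (PySem.List.pyRange 0 (s.length : Int) 1).foldl       --   for wi in range(len(s)):
        (fun ans wi =>
          ans + (if PySem.List.slice s (some wi) (some (wi + n)) = w then 1 else 0))
        ans                                                 --     ans = ans + (s[wi:wi+n] == w)
    else ans) 0

-- ===== PORT B =====
def group_seats_alt (lst : List (List Int)) (n : Int) : Int :=
  lst.foldl (fun total row =>
    let s : List Char := (row.map (fun v => PySem.Int.toChars v)).flatten  -- ''.join(str(v) for v in row)
    let p : Int × Int :=                                   -- p = (run, total)
      s.foldl (fun (p : Int × Int) c =>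
        if c = '0' then (p.1 + 1, p.2)
        else (0, if n ≤ p.1 then p.2 + (p.1 - n + 1) else p.2)) (0, total)
    if n ≤ p.1 then p.2 + (p.1 - n + 1) else p.2) 0

-- ===== PRECONDITION & SPEC =====
-- Pre_ restricts to the task's natural domain n ≥ 1: for n ≤ 0 the pattern '0'*n is
-- empty and A's returned count is an artefact of empty-slice comparisons, which B's
-- run-length algorithm has no reason to reproduce.
def Pre_group_seats (lst : List (List Int)) (n : Int) : Prop := 1 ≤ n
instance (lst : List (List Int)) (n : Int) : Decidable (Pre_group_seats lst n) := by unfold Pre_group_seats; infer_instance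
def pvWitness_group_seats : List (List Int) × Int := ([[1, 0, 0], [0, 10]], 2)
def Spec_group_seats (lst : List (List Int)) (n : Int) (out : Int) : Prop := out = group_seats_alt lst n
instance (lst : List (List Int)) (n : Int) (out : Int) : Decidable (Spec_group_seats lst n out) := by unfold Spec_group_seats; infer_instance

-- ===== CLAIM (what is proved, stated in full; the proofs are below) =====
def Claim_equal_group_seats : Prop := ∀ (lst : List (List Int)) (n : Int), Dom_group_seats lst n → Pre_group_seats lst n → Spec_group_seats lst n (group_seats lst n)

-- ===== LEMMAS AND PROOFS =====

def pvOcc (N : Nat) (s : List Char) : Nat :=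
  (List.range s.length).countP (fun i => decide ((s.drop i).take N = List.replicate N '0'))

theorem pvOcc_cons (N : Nat) (c : Char) (l : List Char) :
    pvOcc N (c :: l)
      = (if (c :: l).take N = List.replicate N '0' then 1 else 0) + pvOcc N l := by
  unfold pvOcc
  rw [List.length_cons, List.range_succ_eq_map, List.countP_cons, List.countP_map]
  have hcp : List.countP ((fun i => decide ((List.drop i (c :: l)).take N = List.replicate N '0')) ∘ Nat.succ)
      (List.range l.length)
      = List.countP (fun i => decide ((List.drop i l).take N = List.replicate N '0')) (List.range l.length) := by
    apply List.countP_congr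
    intro i _
    simp [Function.comp]
  rw [hcp]
  simp only [List.drop_zero, decide_eq_true_eq]
  split_ifs <;> omega

theorem pvTake_replicate_append (N r : Nat) (c : Char) (t : List Char) (hc : c ≠ '0') :
    (List.replicate r '0' ++ c :: t).take N = List.replicate N '0' ↔ N ≤ r := by
  constructor
  · intro h
    by_contra hr
    push_neg at hr
    have h1 : ((List.replicate r '0' ++ c :: t).take N)[r]? = some c := by
      rw [List.getElem?_take_of_lt (by omega)]
      rw [List.getElem?_append_right (by simp)]
      simp
    rw [h, List.getElem?_replicate] at h1
    split at h1
    · exact hc (by simpa using h1.symm)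
    · omega
  · intro h
    rw [List.take_append_of_le_length (by simpa using h), List.take_replicate]
    congr 1
    omega

theorem pvOcc_replicate (N r : Nat) (hN : 1 ≤ N) :
    pvOcc N (List.replicate r '0') = r + 1 - N := by
  induction r with
  | zero => simp [pvOcc]; omega
  | succ r ih =>
    rw [List.replicate_succ, pvOcc_cons, ih]
    have : (('0' :: List.replicate r '0').take N = List.replicate N '0') ↔ N ≤ r + 1 := by
      rw [← List.replicate_succ, List.take_replicate]
      constructor
      · intro h
        have := congrArg List.length h
        simp at this
        omega
      · intro h
        congr 1
        omega
    rw [if_congr this rfl rfl]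
    split_ifs <;> omega

theorem pvOcc_replicate_append (N : Nat) (hN : 1 ≤ N) (c : Char) (t : List Char) (hc : c ≠ '0') :
    ∀ r, pvOcc N (List.replicate r '0' ++ c :: t) = (r + 1 - N) + pvOcc N t := by
  intro r
  induction r with
  | zero =>
    simp only [List.replicate_zero, List.nil_append]
    rw [pvOcc_cons]
    have h0 := (pvTake_replicate_append N 0 c t hc).not
    simp only [List.replicate_zero, List.nil_append] at h0
    rw [if_neg (h0.mpr (by omega))]
    omega
  | succ r ih =>
    have : List.replicate (r+1) '0' ++ c :: t = '0' :: (List.replicate r '0' ++ c :: t) := by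
      rw [List.replicate_succ]; rfl
    rw [this, pvOcc_cons, ih]
    have hcons : ('0' :: (List.replicate r '0' ++ c :: t)) = List.replicate (r+1) '0' ++ c :: t := this.symm
    rw [show (('0' :: (List.replicate r '0' ++ c :: t)).take N) = ((List.replicate (r+1) '0' ++ c :: t).take N) by rw [hcons]]
    rw [if_congr (pvTake_replicate_append N (r+1) c t hc) rfl rfl]
    split_ifs <;> omega

def pvStep (N : Nat) (p : Nat × Nat) (c : Char) : Nat × Nat :=
  if c = '0' then (p.1 + 1, p.2) else (0, if N ≤ p.1 then p.2 + (p.1 - N + 1) else p.2)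

def pvFlush (N : Nat) (p : Nat × Nat) : Nat := if N ≤ p.1 then p.2 + (p.1 - N + 1) else p.2

theorem pvFold (N : Nat) (hN : 1 ≤ N) (cs : List Char) : ∀ (r t : Nat),
    pvFlush N (cs.foldl (pvStep N) (r, t)) = t + pvOcc N (List.replicate r '0' ++ cs) := by
  induction cs with
  | nil =>
    intro r t
    simp only [List.foldl_nil, List.append_nil, pvFlush]
    rw [pvOcc_replicate N r hN]
    split_ifs <;> omega
  | cons c cs ih =>
    intro r t
    rw [List.foldl_cons]
    by_cases hc : c = '0'
    · subst hc
      show pvFlush N (cs.foldl (pvStep N) (pvStep N (r, t) '0')) = _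
      rw [show pvStep N (r, t) '0' = (r + 1, t) from by simp [pvStep]]
      rw [show List.replicate r '0' ++ '0' :: cs = List.replicate (r+1) '0' ++ cs from by
        rw [List.replicate_succ']; simp]
      exact ih (r+1) t
    · rw [show pvStep N (r, t) c = (0, if N ≤ r then t + (r - N + 1) else t) from by simp [pvStep, hc]]
      have h2 := ih 0 (if N ≤ r then t + (r - N + 1) else t)
      simp only [List.replicate_zero, List.nil_append] at h2
      rw [h2, pvOcc_replicate_append N hN c cs hc r]
      split_ifs <;> omega

theorem pvOcc_eq_zero (N : Nat) (s : List Char) (h : ¬ List.replicate N '0' <:+: s) :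
    pvOcc N s = 0 := by
  unfold pvOcc
  rw [List.countP_eq_zero]
  intro i _
  simp only [decide_eq_true_eq]
  intro heq
  apply h
  have h1 : List.replicate N '0' <+: s.drop i := heq ▸ List.take_prefix N (s.drop i)
  exact h1.isInfix.trans (List.drop_suffix i s).isInfix

theorem pvStep_shift (N : Nat) (cs : List Char) : ∀ (r t : Nat),
    cs.foldl (pvStep N) (r, t)
      = ((cs.foldl (pvStep N) (r, 0)).1, t + (cs.foldl (pvStep N) (r, 0)).2) := by
  induction cs with
  | nil => intro r t; simp
  | cons c cs ih =>
    intro r t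
    rw [List.foldl_cons, List.foldl_cons]
    by_cases hc : c = '0'
    · subst hc; simp [pvStep, ih (r+1) t]
    · simp only [pvStep, if_neg hc]
      rw [ih 0, ih 0 (if N ≤ r then 0 + (r - N + 1) else 0)]
      split_ifs <;> simp <;> omega

theorem foldl_count_int {α : Type} (l : List α) (p : α → Prop) [DecidablePred p] (a : Int) :
    l.foldl (fun acc x => acc + if p x then (1:Int) else 0) a
      = a + (l.countP (fun x => decide (p x)) : Int) := by
  induction l generalizing a with
  | nil => simp
  | cons x t ih => simp [List.countP_cons, ih]; split_ifs <;> ring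

theorem pvIntFold (N : Nat) (cs : List Char) : ∀ (r : Nat) (T : Int),
    cs.foldl (fun (p : Int × Int) c =>
        if c = '0' then (p.1 + 1, p.2)
        else (0, if ((N : Int)) ≤ p.1 then p.2 + (p.1 - (N:Int) + 1) else p.2)) ((r : Int), T)
      = (((cs.foldl (pvStep N) (r, 0)).1 : Int), T + ((cs.foldl (pvStep N) (r, 0)).2 : Int)) := by
  induction cs with
  | nil => intro r t; simp
  | cons c cs ih =>
    intro r T
    rw [List.foldl_cons, List.foldl_cons]
    by_cases hc : c = '0'
    · subst hc
      simp only [pvStep, reduceIte]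
      rw [show ((r:Int) + 1, T) = (((r+1 : Nat) : Int), T) from by push_cast; rfl]
      rw [ih (r+1) T]
    · simp only [if_neg hc, pvStep]
      rw [show ((0:Int), if ((N:Int)) ≤ (r:Int) then T + ((r:Int) - (N:Int) + 1) else T)
            = (((0:Nat):Int), if ((N:Int)) ≤ (r:Int) then T + ((r:Int) - (N:Int) + 1) else T) from by
          push_cast; rfl]
      rw [ih 0 _]
      rw [pvStep_shift N cs 0 (if N ≤ r then 0 + (r - N + 1) else 0)]
      have hcast : ((N:Int)) ≤ (r:Int) ↔ N ≤ r := by omega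
      split_ifs with h1 <;> simp only [Prod.mk.injEq, true_and] <;> push_cast <;> omega

theorem foldA_eval (n : Int) (s : List Char) (ans : Int) (w : List Char) :
    (PySem.List.pyRange 0 (s.length : Int) 1).foldl
      (fun ans wi => ans + (if PySem.List.slice s (some wi) (some (wi + n)) = w then 1 else 0)) ans
    = ans + ((List.range s.length).countP
        (fun (k : Nat) => decide (PySem.List.slice s (some (k:Int)) (some ((k:Int) + n)) = w)) : Int) := by
  rw [PySem.List.pyRange_one]
  simp only [Int.sub_zero, Int.toNat_natCast, zero_add]
  rw [List.foldl_map]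
  exact foldl_count_int (List.range s.length)
    (fun k : Nat => PySem.List.slice s (some (k:Int)) (some ((k:Int) + n)) = w) ans

theorem slice_pos_char (n : Int) (hn : 1 ≤ n) (s : List Char) (k : Nat) :
    PySem.List.slice s (some (k:Int)) (some ((k:Int) + n)) = (s.drop k).take n.toNat := by
  rw [PySem.List.slice_toNat s (by positivity) (by omega)]
  rw [Int.toNat_natCast]
  congr 1
  omega

theorem rowA_pos (n : Int) (hn : 1 ≤ n) (acc : Int) (s : List Char) :
    (if PySem.Chars.isIn (PySem.List.pyRepeat ['0'] n) s then
       (PySem.List.pyRange 0 (s.length : Int) 1).foldl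
         (fun ans wi => ans + (if PySem.List.slice s (some wi) (some (wi + n)) = PySem.List.pyRepeat ['0'] n then 1 else 0)) acc
     else acc)
    = acc + (pvOcc n.toNat s : Int) := by
  rw [PySem.List.pyRepeat_singleton]
  by_cases hin : PySem.Chars.isIn (List.replicate n.toNat '0') s = true
  · rw [if_pos hin, foldA_eval]
    congr 2
    unfold pvOcc
    apply List.countP_congr
    intro k _
    simp [slice_pos_char n hn s k]
  · rw [if_neg hin]
    have h0 : pvOcc n.toNat s = 0 :=
      pvOcc_eq_zero n.toNat s (fun hinf => hin ((PySem.Chars.isIn_iff_infix _ s).mpr hinf))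
    rw [h0]
    simp

theorem rowB_pos (n : Int) (hn : 1 ≤ n) (total : Int) (s : List Char) :
    (if n ≤ (s.foldl (fun (p : Int × Int) c =>
            if c = '0' then (p.1 + 1, p.2)
            else (0, if n ≤ p.1 then p.2 + (p.1 - n + 1) else p.2)) ((0 : Int), total)).1
     then (s.foldl (fun (p : Int × Int) c =>
            if c = '0' then (p.1 + 1, p.2)
            else (0, if n ≤ p.1 then p.2 + (p.1 - n + 1) else p.2)) ((0 : Int), total)).2
          + ((s.foldl (fun (p : Int × Int) c =>
            if c = '0' then (p.1 + 1, p.2)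
            else (0, if n ≤ p.1 then p.2 + (p.1 - n + 1) else p.2)) ((0 : Int), total)).1 - n + 1)
     else (s.foldl (fun (p : Int × Int) c =>
            if c = '0' then (p.1 + 1, p.2)
            else (0, if n ≤ p.1 then p.2 + (p.1 - n + 1) else p.2)) ((0 : Int), total)).2)
    = total + (pvOcc n.toNat s : Int) := by
  have hn' : ((n.toNat : Int)) = n := Int.toNat_of_nonneg (by omega)
  have hint := pvIntFold n.toNat s 0 total
  rw [hn'] at hint
  rw [Nat.cast_zero] at hint
  rw [hint]
  have hfold := pvFold n.toNat (by omega) s 0 0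
  simp only [List.replicate_zero, List.nil_append, pvFlush] at hfold
  split_ifs at hfold ⊢ <;> omega

-- ===== VERDICT (by name: the statement is the Claim_ definition above) =====
theorem group_seats_spec : Claim_equal_group_seats := by
  intro lst n _ hn
  unfold Spec_group_seats group_seats group_seats_alt
  simp only [rowA_pos n hn, rowB_pos n hn]
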